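-- pv_equiv track=rewrite | github.com/clorton/AdventOfCode | 2017/2017-16.py | one_round
-- ===== SOURCE A (Python) =====
-- def one_round(programs, dance):
--     for move in dance:
--         if move[0] == 's':
--             distance = int(move[1:])
--             programs = spin(programs, distance)
--         elif move[0] == 'x':
--             a, b = [int(element) for element in move[1:].split('/')]
--             programs = exchange(programs, a, b)
--         elif move[0] == 'p':
--             a, b = move[1:].split('/')
--             programs = partner(programs, a, b)
--
--     return programs
--
-- def spin(programs, distance=0):
--     length = len(programs)
--     result = [programs[(i-distance) % length] for i in range(length)]
--
--     return result
--
-- def exchange(programs, a=0, b=0):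
--     result = [element for element in programs]
--     result[a], result[b] = result[b], result[a]
--
--     return result
--
-- def partner(programs, a='a', b='a'):
--     result = exchange(programs, ''.join(programs).find(a), ''.join(programs).find(b))
--
--     return result
-- ===== SOURCE B (Python) =====
-- def one_round(programs, dance):
--     # Lazy rotation: spins only adjust an offset; swaps edit one working list in
--     # place; the rotated list is materialised once at the end.
--     lst = list(programs)
--     n = len(lst)
--     off = 0
--     for move in dance:
--         if move[0] == 's':
--             off -= int(move[1:])
--         elif move[0] == 'x':
--             a, b = [int(element) for element in move[1:].split('/')]
--             i = (a + off) % n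
--             j = (b + off) % n
--             lst[i], lst[j] = lst[j], lst[i]
--         elif move[0] == 'p':
--             a, b = move[1:].split('/')
--             i = lst.index(a)
--             j = lst.index(b)
--             lst[i], lst[j] = lst[j], lst[i]
--     return [lst[(i + off) % n] for i in range(n)]
-- ===== Notes on version B (the rewrite author's own statement) =====
-- stated objective: alternative
-- what changed: B never rebuilds the list per move: spins only adjust an integer offset, exchanges/partners swap two cells of one working list in place (partners located by list index instead of find() on the joined string), and the rotated list is materialised once at the end.
-- outside the precondition, e.g. on one_round(['a', 'b', 'a'], ['s1', 'pa/b']): A returns ['b', 'a', 'a'], B returns ['a', 'b', 'a']; on one_round(['ab', 'c', 'd'], ['pc/ab']): A returns ['d', 'c', 'ab'], B returns ['c', 'ab', 'd']; on one_round(['a', 'b'], ['pc/a']): A returns ['b', 'a'], B raises ValueError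
import Mathlib
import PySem

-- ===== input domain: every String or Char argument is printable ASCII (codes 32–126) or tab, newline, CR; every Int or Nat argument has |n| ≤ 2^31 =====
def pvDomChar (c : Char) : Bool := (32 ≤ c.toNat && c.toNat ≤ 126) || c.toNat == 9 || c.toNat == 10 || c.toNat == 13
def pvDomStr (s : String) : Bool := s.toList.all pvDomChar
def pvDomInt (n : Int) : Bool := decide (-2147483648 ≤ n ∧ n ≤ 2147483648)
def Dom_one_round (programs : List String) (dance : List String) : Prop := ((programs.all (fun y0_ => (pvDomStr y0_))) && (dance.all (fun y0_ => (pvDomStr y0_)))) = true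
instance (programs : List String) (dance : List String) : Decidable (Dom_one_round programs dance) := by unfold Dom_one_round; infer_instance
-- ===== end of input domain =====

-- B replaces A's rebuild-the-list-per-move loop by a lazy rotation offset plus
-- in-place swaps on one working list, materialising the rotated list once at the end.

-- ===== PORT A =====
def spinA (programs : List String) (distance : Int) : List String :=
  let length : Int := PySem.List.len programs
  (PySem.List.pyRange 0 length 1).map (fun i =>
    PySem.List.pyGetD programs (PySem.Int.mod (i - distance) length) "")

def exchangeA (programs : List String) (a b : Int) : List String :=
  -- result = [element for element in programs]; result[a], result[b] = result[b], result[a]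
  let result := programs
  let vb := PySem.List.pyGetD result b ""
  let va := PySem.List.pyGetD result a ""
  PySem.List.pySetD (PySem.List.pySetD result a vb) b va

def partnerA (programs : List String) (a b : String) : List String :=
  exchangeA programs (PySem.Str.find (PySem.Str.join "" programs) a)
                     (PySem.Str.find (PySem.Str.join "" programs) b)

def stepAc (programs : List String) (move : String) (c : Char) : List String :=
    if c = 's' then
      match PySem.Int.ofStr? (PySem.Str.slice move (some 1) none) with
      | some distance => spinA programs distance
      | none => programs  -- int() ValueError: outside Pre_
    else if c = 'x' then
      match ((PySem.Str.split? (PySem.Str.slice move (some 1) none) "/").getD []).map PySem.Int.ofStr? with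
      | [some a, some b] => exchangeA programs a b
      | _ => programs  -- ValueError (int() or unpack): outside Pre_
    else if c = 'p' then
      match (PySem.Str.split? (PySem.Str.slice move (some 1) none) "/").getD [] with
      | [a, b] => partnerA programs a b
      | _ => programs  -- unpack ValueError: outside Pre_
    else programs

def stepA (programs : List String) (move : String) : List String :=
  match move.toList with
  | [] => programs  -- move[0] raises IndexError: outside Pre_
  | c :: _ => stepAc programs move c

def one_round (programs : List String) (dance : List String) : List String :=
  dance.foldl stepA programs

-- ===== PORT B =====
def swapB (lst : List String) (i j : Int) : List String :=
  -- lst[i], lst[j] = lst[j], lst[i]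
  let vj := PySem.List.pyGetD lst j ""
  let vi := PySem.List.pyGetD lst i ""
  PySem.List.pySetD (PySem.List.pySetD lst i vj) j vi

def danceStepc (n : Int) (st : List String × Int) (move : String) (c : Char) : List String × Int :=
    if c = 's' then
      match PySem.Int.ofStr? (PySem.Str.slice move (some 1) none) with
      | some distance => (st.1, st.2 - distance)
      | none => st
    else if c = 'x' then
      match ((PySem.Str.split? (PySem.Str.slice move (some 1) none) "/").getD []).map PySem.Int.ofStr? with
      | [some a, some b] =>
          (swapB st.1 (PySem.Int.mod (a + st.2) n) (PySem.Int.mod (b + st.2) n), st.2)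
      | _ => st
    else if c = 'p' then
      match (PySem.Str.split? (PySem.Str.slice move (some 1) none) "/").getD [] with
      | [a, b] =>
          match PySem.List.index? st.1 a, PySem.List.index? st.1 b with
          | some i, some j => (swapB st.1 (i : Int) (j : Int), st.2)
          | _, _ => st
      | _ => st
    else st

def danceStep (n : Int) (st : List String × Int) (move : String) : List String × Int :=
  match move.toList with
  | [] => st
  | c :: _ => danceStepc n st move c

def one_round_alt (programs : List String) (dance : List String) : List String :=
  let n : Int := PySem.List.len programs
  let st := dance.foldl (danceStep n) (programs, 0)
  (PySem.List.pyRange 0 n 1).map (fun i =>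
    PySem.List.pyGetD st.1 (PySem.Int.mod (i + st.2) n) "")

-- ===== PRECONDITION & SPEC =====
def preMovec (programs : List String) (n : Int) (move : String) (c : Char) : Bool :=
    if c = 's' then (PySem.Int.ofStr? (PySem.Str.slice move (some 1) none)).isSome
    else if c = 'x' then
      match ((PySem.Str.split? (PySem.Str.slice move (some 1) none) "/").getD []).map PySem.Int.ofStr? with
      | [some a, some b] => decide (-n ≤ a ∧ a < n ∧ -n ≤ b ∧ b < n)
      | _ => false
    else if c = 'p' then
      match (PySem.Str.split? (PySem.Str.slice move (some 1) none) "/").getD [] with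
      | [a, b] => programs.contains a && programs.contains b
      | _ => false
    else true

def preMove (programs : List String) (n : Int) (move : String) : Bool :=
  match move.toList with
  | [] => false
  | c :: _ => preMovec programs n move c

-- Pre_ excludes dances on which A raises (empty or malformed moves, out-of-range
-- exchange indices, partner names absent from the list — there B raises ValueError where
-- A's find() = -1 accidentally wraps to the last element), and, only when a partner move
-- occurs, programs lists with duplicate or multi-character names, on which A's answer is an
-- accident of locating programs by character offset inside the joined string.
def Pre_one_round (programs : List String) (dance : List String) : Prop :=
  (∀ move ∈ dance, preMove programs (PySem.List.len programs) move = true) ∧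
  ((∃ move ∈ dance, move.toList.head? = some 'p') →
     programs.Nodup ∧ ∀ s ∈ programs, s.toList.length = 1)

instance (programs : List String) (dance : List String) : Decidable (Pre_one_round programs dance) := by
  unfold Pre_one_round; infer_instance

def pvWitness_one_round : List String × List String := (["a", "b", "c"], ["s1", "x0/2", "pa/c", "s-4"])

def Spec_one_round (programs : List String) (dance : List String) (out : List String) : Prop :=
  out = one_round_alt programs dance
instance (programs : List String) (dance : List String) (out : List String) : Decidable (Spec_one_round programs dance out) := by
  unfold Spec_one_round; infer_instance

-- ===== CLAIM (what is proved, stated in full; the proofs are below) =====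
def Claim_equal_one_round : Prop := ∀ (programs : List String) (dance : List String), Dom_one_round programs dance → Pre_one_round programs dance → Spec_one_round programs dance (one_round programs dance)

-- ===== LEMMAS AND PROOFS =====

-- The rotated view of the working list: view L off reads L at (k + off) mod |L|.
def idxN (n : Nat) (off : Int) (k : Nat) : Nat := (((k : Int) + off) % (n : Int)).toNat

def viewN (L : List String) (off : Int) : List String :=
  (List.range L.length).map (fun k => L.getD (idxN L.length off k) "")

theorem length_viewN (L : List String) (off : Int) : (viewN L off).length = L.length := by
  simp [viewN]

theorem idxN_lt {n : Nat} (hn : 0 < n) (off : Int) (k : Nat) : idxN n off k < n := by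
  have h1 : (0:Int) < (n:Int) := by exact_mod_cast hn
  have := Int.emod_nonneg ((k:Int) + off) (by omega : (n:Int) ≠ 0)
  have := Int.emod_lt_of_pos ((k:Int) + off) h1
  unfold idxN; omega

theorem idxN_zero {n : Nat} (k : Nat) (hk : k < n) : idxN n 0 k = k := by
  unfold idxN
  rw [add_zero, Int.emod_eq_of_lt (by omega) (by exact_mod_cast hk)]
  omega

theorem idxN_idxN {n : Nat} (hn : 0 < n) (o1 o2 : Int) (k : Nat) :
    idxN n o1 (idxN n o2 k) = idxN n (o1 + o2) k := by
  have h1 : (0:Int) < (n:Int) := by exact_mod_cast hn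
  have hnn := Int.emod_nonneg ((k:Int) + o2) (by omega : (n:Int) ≠ 0)
  unfold idxN
  rw [Int.toNat_of_nonneg hnn, Int.emod_add_emod]
  ring_nf

theorem idxN_cancel {n : Nat} (hn : 0 < n) (off : Int) (k : Nat) (hk : k < n) :
    idxN n (-off) (idxN n off k) = k := by
  rw [idxN_idxN hn, neg_add_cancel, idxN_zero k hk]

theorem idxN_cancel' {n : Nat} (hn : 0 < n) (off : Int) (k : Nat) (hk : k < n) :
    idxN n off (idxN n (-off) k) = k := by
  have := idxN_cancel hn (-off) k hk
  rwa [neg_neg] at this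

theorem getElem_viewN (L : List String) (off : Int) (k : Nat) (hk : k < (viewN L off).length) :
    (viewN L off)[k] = L.getD (idxN L.length off k) "" := by
  simp [viewN]

theorem viewN_zero (L : List String) : viewN L 0 = L := by
  apply List.ext_getElem (by simp [length_viewN])
  intro k h1 h2
  rw [getElem_viewN, idxN_zero k h2, List.getD_eq_getElem _ _ h2]

theorem viewN_set (L : List String) (off : Int) (j : Nat) (v : String) (hj : j < L.length) :
    viewN (L.set j v) off = (viewN L off).set (idxN L.length (-off) j) v := by
  have hn : 0 < L.length := by omega
  apply List.ext_getElem (by simp [length_viewN])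
  intro k h1 h2
  have hk : k < L.length := by simpa [length_viewN] using h2
  rw [List.getElem_set]
  have h3 : k < (viewN (L.set j v) off).length := by simpa [length_viewN] using hk
  rw [getElem_viewN _ _ _ h3]
  simp only [List.length_set]
  have hidx : idxN L.length off k < L.length := idxN_lt hn off k
  rw [List.getD_eq_getElem _ _ (by simpa using hidx), List.getElem_set,
    getElem_viewN _ _ _ (by simpa [length_viewN] using hk),
    List.getD_eq_getElem _ _ hidx]
  by_cases h : j = idxN L.length off k
  · have h' : idxN L.length (-off) j = k := by rw [h, idxN_cancel hn off k hk]
    rw [if_pos h, if_pos h']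
  · have h' : ¬ idxN L.length (-off) j = k := by
      intro hc; apply h; rw [← hc, idxN_cancel' hn off j hj]
    rw [if_neg h, if_neg h']

theorem viewN_viewN (L : List String) (o1 o2 : Int) :
    viewN (viewN L o1) o2 = viewN L (o2 + o1) := by
  rcases Nat.eq_zero_or_pos L.length with h | hn
  · have : L = [] := List.eq_nil_of_length_eq_zero h
    subst this; simp [viewN]
  apply List.ext_getElem (by simp [length_viewN])
  intro k h1 h2
  have hk : k < L.length := by simpa [length_viewN] using h2
  rw [getElem_viewN _ _ _ (by simpa [length_viewN] using hk)]
  simp only [length_viewN]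
  have hidx : idxN L.length o2 k < L.length := idxN_lt hn o2 k
  rw [List.getD_eq_getElem _ _ (by simpa [length_viewN] using hidx),
    getElem_viewN _ _ _ (by simpa [length_viewN] using hidx),
    getElem_viewN _ _ _ (by simpa [length_viewN] using hk)]
  rw [idxN_idxN hn, add_comm o1 o2]

theorem nodup_viewN (L : List String) (off : Int) (h : L.Nodup) : (viewN L off).Nodup := by
  rcases Nat.eq_zero_or_pos L.length with h0 | hn
  · have : L = [] := List.eq_nil_of_length_eq_zero h0
    subst this; simp [viewN]
  rw [List.nodup_iff_getElem?_ne_getElem?]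
  intro i j hij hj hc
  have hj' : j < L.length := by simpa [length_viewN] using hj
  have hi' : i < L.length := by omega
  rw [List.getElem?_eq_getElem (by simpa [length_viewN] using hi'),
    List.getElem?_eq_getElem hj,
    getElem_viewN _ _ _ (by simpa [length_viewN] using hi'),
    getElem_viewN _ _ _ hj] at hc
  have hci : idxN L.length off i < L.length := idxN_lt hn off i
  have hcj : idxN L.length off j < L.length := idxN_lt hn off j
  rw [List.getD_eq_getElem _ _ hci, List.getD_eq_getElem _ _ hcj] at hc
  have : idxN L.length off i = idxN L.length off j :=
    (List.Nodup.getElem_inj_iff h).mp (by exact_mod_cast Option.some.inj hc)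
  have : i = j := by
    rw [← idxN_cancel hn off i hi', ← idxN_cancel hn off j hj', this]
  omega

theorem mem_of_mem_viewN (L : List String) (off : Int) (s : String) (h : s ∈ viewN L off) : s ∈ L := by
  rcases List.mem_iff_getElem.mp h with ⟨k, hk, hks⟩
  have hk' : k < L.length := by simpa [length_viewN] using hk
  have hn : 0 < L.length := by omega
  rw [getElem_viewN _ _ _ hk, List.getD_eq_getElem _ _ (idxN_lt hn off k)] at hks
  exact hks ▸ List.getElem_mem _

-- Python indexing on in-range Int indices, as plain Nat operations.
theorem pyGetD_int (L : List String) (i : Int) (h1 : -(L.length:Int) ≤ i) (h2 : i < (L.length:Int)) :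
    PySem.List.pyGetD L i "" = L.getD (i % (L.length:Int)).toNat "" := by
  by_cases hi : 0 ≤ i
  · rw [Int.emod_eq_of_lt hi h2]
    simp [PySem.List.pyGetD, PySem.List.pyGet?, PySem.List.pyIdx?, hi, h2,
      List.getD_eq_getElem?_getD]
  · have h3 : i % (L.length:Int) = i + L.length := by
      have h4 : (i + L.length) % (L.length:Int) = i % (L.length:Int) := by
        have h5 := Int.add_mul_emod_self_left (a := i) (b := (L.length:Int)) (c := 1)
        rw [mul_one] at h5
        exact h5
      rw [← h4, Int.emod_eq_of_lt (by omega) (by omega)]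
    rw [h3]
    simp [PySem.List.pyGetD, PySem.List.pyGet?, PySem.List.pyIdx?, hi, h1,
      List.getD_eq_getElem?_getD]
    congr 2
    omega

theorem pySetD_int (L : List String) (i : Int) (v : String) (h1 : -(L.length:Int) ≤ i) (h2 : i < (L.length:Int)) :
    PySem.List.pySetD L i v = L.set (i % (L.length:Int)).toNat v := by
  by_cases hi : 0 ≤ i
  · rw [Int.emod_eq_of_lt hi h2]
    simp [PySem.List.pySetD, PySem.List.pySet?, PySem.List.pyIdx?, hi, h2]
  · have h3 : i % (L.length:Int) = i + L.length := by
      have h4 : (i + L.length) % (L.length:Int) = i % (L.length:Int) := by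
        have h5 := Int.add_mul_emod_self_left (a := i) (b := (L.length:Int)) (c := 1)
        rw [mul_one] at h5
        exact h5
      rw [← h4, Int.emod_eq_of_lt (by omega) (by omega)]
    rw [h3]
    simp [PySem.List.pySetD, PySem.List.pySet?, PySem.List.pyIdx?, hi, h1]
    congr 1
    omega

-- A's list-comprehension rotation shape is exactly viewN.
theorem pyform_eq_viewN (L : List String) (off : Int) (m : Int) (hm : m = (L.length:Int)) :
    (PySem.List.pyRange 0 m 1).map (fun i => PySem.List.pyGetD L (PySem.Int.mod (i + off) m) "")
      = viewN L off := by
  rcases Nat.eq_zero_or_pos L.length with h0 | hn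
  · have : L = [] := List.eq_nil_of_length_eq_zero h0
    subst this
    simp at hm
    subst hm
    simp [viewN, PySem.List.pyRange_one_eq_nil (by omega : (0:Int) ≤ 0)]
  have hm' : 0 < m := by rw [hm]; exact_mod_cast hn
  subst hm
  rw [PySem.List.pyRange_one, List.map_map]
  apply List.ext_getElem (by simp [length_viewN])
  intro k h1 h2
  have hk : k < L.length := by simpa [length_viewN] using h2
  simp only [List.getElem_map, List.getElem_range, Function.comp_apply]
  rw [getElem_viewN _ _ _ h2]
  have hz : ((0:Int) + k) = (k:Int) := by omega
  rw [PySem.Int.mod_eq_emod_of_pos hm']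
  have hnn := Int.emod_nonneg ((k:Int) + off) (by omega : (L.length:Int) ≠ 0)
  have hlt := Int.emod_lt_of_pos ((k:Int) + off) hm'
  rw [hz, pyGetD_int L _ (by omega) (by omega)]
  rw [Int.emod_emod_of_dvd _ dvd_rfl]
  rfl

theorem spinA_eq_viewN (P : List String) (d : Int) : spinA P d = viewN P (-d) := by
  unfold spinA
  simp only [sub_eq_add_neg]
  exact pyform_eq_viewN P (-d) _ (by simp)

theorem idxN_shift {n : Nat} (hn : 0 < n) (x off : Int) :
    idxN n off ((x % (n:Int)).toNat) = ((x + off) % (n:Int)).toNat := by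
  have h0 : ((n:Int)) ≠ 0 := by exact_mod_cast Nat.pos_iff_ne_zero.mp hn
  unfold idxN
  rw [Int.toNat_of_nonneg (Int.emod_nonneg _ h0), Int.emod_add_emod]

theorem exchangeA_eq (P : List String) (a b : Int)
    (ha1 : -(P.length:Int) ≤ a) (ha2 : a < (P.length:Int))
    (hb1 : -(P.length:Int) ≤ b) (hb2 : b < (P.length:Int)) :
    exchangeA P a b
      = List.set (P.set (a % (P.length:Int)).toNat (P.getD (b % (P.length:Int)).toNat ""))
          (b % (P.length:Int)).toNat (P.getD (a % (P.length:Int)).toNat "") := by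
  unfold exchangeA
  show PySem.List.pySetD (PySem.List.pySetD P a (PySem.List.pyGetD P b "")) b (PySem.List.pyGetD P a "") = _
  have hn : 0 < P.length := by omega
  have h0 : ((P.length:Int)) ≠ 0 := by omega
  rw [pyGetD_int P b hb1 hb2, pyGetD_int P a ha1 ha2, pySetD_int P a _ ha1 ha2]
  have hlen : (((P.set (a % (P.length:Int)).toNat (P.getD (b % (P.length:Int)).toNat "")).length : Int)) = (P.length : Int) := by simp
  rw [pySetD_int _ b _ (by rw [hlen]; omega) (by rw [hlen]; omega), hlen]

theorem swapB_eq (L : List String) (i j : Int)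
    (hi1 : 0 ≤ i) (hi2 : i < (L.length:Int)) (hj1 : 0 ≤ j) (hj2 : j < (L.length:Int)) :
    swapB L i j = (L.set i.toNat (L.getD j.toNat "")).set j.toNat (L.getD i.toNat "") := by
  unfold swapB
  show PySem.List.pySetD (PySem.List.pySetD L i (PySem.List.pyGetD L j "")) j (PySem.List.pyGetD L i "") = _
  rw [pyGetD_int L j (by omega) hj2, pyGetD_int L i (by omega) hi2,
    Int.emod_eq_of_lt hj1 hj2, Int.emod_eq_of_lt hi1 hi2,
    pySetD_int L i _ (by omega) hi2, Int.emod_eq_of_lt hi1 hi2]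
  have hlen : (((L.set i.toNat (L.getD j.toNat "")).length : Int)) = (L.length : Int) := by simp
  rw [pySetD_int _ j _ (by rw [hlen]; omega) (by rw [hlen]; omega), hlen,
    Int.emod_eq_of_lt hj1 hj2]

-- find on the join of distinct one-character names is a list index.
theorem find_join_singletons (P : List String) (a : String)
    (h1 : ∀ s ∈ P, s.toList.length = 1) (ha : a ∈ P) :
    ∃ k : Nat, PySem.Str.find (PySem.Str.join "" P) a = (k : Int) ∧ k < P.length ∧ P[k]? = some a := by
  obtain ⟨c, hc⟩ := List.length_eq_one_iff.mp (h1 a ha)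
  have hmap : P.map String.toList = (P.map (fun s => s.toList.headD ' ')).map (fun c => [c]) := by
    rw [List.map_map]
    apply List.map_congr_left
    intro s hs
    obtain ⟨x, hx⟩ := List.length_eq_one_iff.mp (h1 s hs)
    simp [hx]
  have hcs : (PySem.Str.join "" P).toList = P.map (fun s => s.toList.headD ' ') := by
    rw [PySem.Str.toList_join, hmap]
    have : ("" : String).toList = [] := by decide
    rw [this, PySem.Chars.join_nil_singletons]
  have hfind : PySem.Str.find (PySem.Str.join "" P) a
      = PySem.Chars.find (P.map (fun s => s.toList.headD ' ')) [c] := by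
    rw [PySem.Str.find_eq, hcs, hc]
  set cs := P.map (fun s => s.toList.headD ' ') with hcs'
  have hmem : c ∈ cs := by
    refine List.mem_map.mpr ⟨a, ha, ?_⟩
    simp [hc]
  have hpos : 0 ≤ PySem.Chars.find cs [c] :=
    (PySem.Chars.find_nonneg_iff cs [c]).mpr ((List.singleton_infix_iff c cs).mpr hmem)
  obtain ⟨hpre, -⟩ := PySem.Chars.find_spec hpos
  set k := (PySem.Chars.find cs [c]).toNat with hk
  obtain ⟨t, ht⟩ := hpre
  have hhd : (cs.drop k).head? = some c := by rw [← ht]; rfl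
  rw [List.head?_drop] at hhd
  have hklt : k < cs.length := by
    by_contra hge
    rw [List.getElem?_eq_none (by omega)] at hhd
    simp at hhd
  refine ⟨k, ?_, by rw [hcs', List.length_map] at hklt; exact hklt, ?_⟩
  · rw [hfind, hk, Int.toNat_of_nonneg hpos]
  · have hklt' : k < P.length := by rw [hcs', List.length_map] at hklt; exact hklt
    have hcsk : cs[k] = P[k].toList.headD ' ' := by simp [hcs']
    rw [List.getElem?_eq_getElem hklt, hcsk] at hhd
    obtain ⟨x, hx⟩ := List.length_eq_one_iff.mp (h1 P[k] (List.getElem_mem hklt'))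
    have hxc : x = c := by simpa [hx] using Option.some.inj hhd
    have htl : P[k].toList = a.toList := by rw [hx, hxc, hc]
    have : P[k] = a := by
      have := congrArg String.ofList htl
      simpa [String.ofList_toList] using this
    rw [List.getElem?_eq_getElem hklt', this]

theorem exchange_view (L : List String) (off : Int) (a b : Int)
    (ha1 : -(L.length:Int) ≤ a) (ha2 : a < (L.length:Int))
    (hb1 : -(L.length:Int) ≤ b) (hb2 : b < (L.length:Int)) :
    exchangeA (viewN L off) a b
      = viewN (swapB L (PySem.Int.mod (a + off) (L.length:Int)) (PySem.Int.mod (b + off) (L.length:Int))) off := by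
  have hn : 0 < L.length := by omega
  have h0 : (0:Int) < (L.length:Int) := by exact_mod_cast hn
  have h0' : ((L.length:Int)) ≠ 0 := by omega
  rw [PySem.Int.mod_eq_emod_of_pos h0, PySem.Int.mod_eq_emod_of_pos h0]
  have hia1 := Int.emod_nonneg (a + off) h0'
  have hia2 := Int.emod_lt_of_pos (a + off) h0
  have hib1 := Int.emod_nonneg (b + off) h0'
  have hib2 := Int.emod_lt_of_pos (b + off) h0
  rw [swapB_eq L _ _ hia1 hia2 hib1 hib2]
  rw [exchangeA_eq (viewN L off) a b (by rw [length_viewN]; omega) (by rw [length_viewN]; omega)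
    (by rw [length_viewN]; omega) (by rw [length_viewN]; omega)]
  have hsetlen : (L.set ((a + off) % (L.length:Int)).toNat (L.getD ((b + off) % (L.length:Int)).toNat "")).length = L.length := by simp
  rw [viewN_set _ off _ _ (by rw [hsetlen]; omega), hsetlen,
    viewN_set _ off _ _ (by omega)]
  have hsa : idxN L.length (-off) ((a + off) % (L.length:Int)).toNat = (a % (L.length:Int)).toNat := by
    rw [idxN_shift hn, add_neg_cancel_right]
  have hsb : idxN L.length (-off) ((b + off) % (L.length:Int)).toNat = (b % (L.length:Int)).toNat := by
    rw [idxN_shift hn, add_neg_cancel_right]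
  have hval : ∀ x : Int, -(L.length:Int) ≤ x → x < (L.length:Int) →
      L.getD ((x + off) % (L.length:Int)).toNat "" = (viewN L off).getD (x % (L.length:Int)).toNat "" := by
    intro x hx1 hx2
    have hlt : (x % (L.length:Int)).toNat < L.length := by
      have := Int.emod_nonneg x h0'
      have := Int.emod_lt_of_pos x h0
      omega
    have h2 : (x % (L.length:Int)).toNat < (viewN L off).length := by
      rw [length_viewN]; exact hlt
    rw [List.getD_eq_getElem _ _ h2, getElem_viewN _ _ _ h2, idxN_shift hn x off]
  rw [length_viewN, hsa, hsb, hval a ha1 ha2, hval b hb1 hb2]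

theorem partner_view (L : List String) (off : Int) (a b : String)
    (hnd : L.Nodup) (h1 : ∀ s ∈ L, s.toList.length = 1)
    (ja jb : Nat) (hja : PySem.List.index? L a = some ja) (hjb : PySem.List.index? L b = some jb) :
    partnerA (viewN L off) a b = viewN (swapB L (ja : Int) (jb : Int)) off := by
  rw [PySem.List.index?_eq_idxOf?, List.idxOf?_eq_some_iff] at hja hjb
  obtain ⟨hjalt, hjaget, -⟩ := hja
  obtain ⟨hjblt, hjbget, -⟩ := hjb
  have hn : 0 < L.length := by omega
  have hPs : ∀ s ∈ viewN L off, s.toList.length = 1 :=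
    fun s hs => h1 s (mem_of_mem_viewN L off s hs)
  have hgetP : ∀ j : Nat, j < L.length →
      (viewN L off).getD (idxN L.length (-off) j) "" = L.getD j "" := by
    intro j hj
    have hb1 : idxN L.length (-off) j < (viewN L off).length := by
      rw [length_viewN]; exact idxN_lt hn (-off) j
    rw [List.getD_eq_getElem _ _ hb1, getElem_viewN _ _ _ hb1, idxN_cancel' hn off j hj]
  have hgetDmem : ∀ (M : List String) (k : Nat), k < M.length → M.getD k "" ∈ M := by
    intro M k hk
    rw [List.getD_eq_getElem _ _ hk]; exact List.getElem_mem hk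
  have hvja : L.getD ja "" = a := by rw [List.getD_eq_getElem _ _ hjalt]; exact hjaget
  have hvjb : L.getD jb "" = b := by rw [List.getD_eq_getElem _ _ hjblt]; exact hjbget
  have hPa : a ∈ viewN L off := by
    rw [← hvja, ← hgetP ja hjalt]
    exact hgetDmem _ _ (by rw [length_viewN]; exact idxN_lt hn (-off) ja)
  have hPb : b ∈ viewN L off := by
    rw [← hvjb, ← hgetP jb hjblt]
    exact hgetDmem _ _ (by rw [length_viewN]; exact idxN_lt hn (-off) jb)
  obtain ⟨ka, hfa, hkalt, hkaget⟩ := find_join_singletons (viewN L off) a hPs hPa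
  obtain ⟨kb, hfb, hkblt, hkbget⟩ := find_join_singletons (viewN L off) b hPs hPb
  unfold partnerA
  rw [hfa, hfb]
  rw [exchangeA_eq (viewN L off) ka kb (by omega) (by exact_mod_cast hkalt)
    (by omega) (by exact_mod_cast hkblt)]
  have hmka : (((ka:Int)) % ((viewN L off).length : Int)).toNat = ka := by
    rw [Int.emod_eq_of_lt (by omega) (by exact_mod_cast hkalt)]; omega
  have hmkb : (((kb:Int)) % ((viewN L off).length : Int)).toNat = kb := by
    rw [Int.emod_eq_of_lt (by omega) (by exact_mod_cast hkblt)]; omega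
  rw [hmka, hmkb]
  -- B side
  rw [swapB_eq L (ja:Int) (jb:Int) (by omega) (by exact_mod_cast hjalt) (by omega) (by exact_mod_cast hjblt)]
  have hjn : ((ja:Int)).toNat = ja := by omega
  have hjbn : ((jb:Int)).toNat = jb := by omega
  rw [hjn, hjbn]
  have hsetlen : (L.set ja (L.getD jb "")).length = L.length := by simp
  rw [viewN_set _ off jb _ (by rw [hsetlen]; exact hjblt), hsetlen,
    viewN_set _ off ja _ hjalt]
  -- identify indices via Nodup
  have hPnd : (viewN L off).Nodup := nodup_viewN L off hnd
  have hkalt' : ka < L.length := by rwa [length_viewN] at hkalt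
  have hkblt' : kb < L.length := by rwa [length_viewN] at hkblt
  have hva : (viewN L off).getD ka "" = a := by
    rw [List.getD_eq_getElem _ _ hkalt]
    have := hkaget
    rwa [List.getElem?_eq_getElem hkalt, Option.some_inj] at this
  have hvb : (viewN L off).getD kb "" = b := by
    rw [List.getD_eq_getElem _ _ hkblt]
    have := hkbget
    rwa [List.getElem?_eq_getElem hkblt, Option.some_inj] at this
  have hinj : ∀ (i j : Nat), i < (viewN L off).length → j < (viewN L off).length →
      (viewN L off).getD i "" = (viewN L off).getD j "" → i = j := by
    intro i j hi hj hEq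
    rw [List.getD_eq_getElem _ _ hi, List.getD_eq_getElem _ _ hj] at hEq
    exact (List.Nodup.getElem_inj_iff hPnd).mp hEq
  have hsja : idxN L.length (-off) ja = ka := by
    apply hinj _ _ (by rw [length_viewN]; exact idxN_lt hn (-off) ja) hkalt
    rw [hgetP ja hjalt, hvja, hva]
  have hsjb : idxN L.length (-off) jb = kb := by
    apply hinj _ _ (by rw [length_viewN]; exact idxN_lt hn (-off) jb) hkblt
    rw [hgetP jb hjblt, hvjb, hvb]
  rw [hsja, hsjb, hva, hvb, hvja, hvjb]

theorem swapB_perm (L : List String) (i j : Int)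
    (hi1 : 0 ≤ i) (hi2 : i < (L.length:Int)) (hj1 : 0 ≤ j) (hj2 : j < (L.length:Int)) :
    (swapB L i j).Perm L := by
  rw [swapB_eq L i j hi1 hi2 hj1 hj2]
  have hi : i.toNat < L.length := by omega
  have hj : j.toNat < L.length := by omega
  rw [List.getD_eq_getElem _ _ hj, List.getD_eq_getElem _ _ hi]
  exact List.set_set_perm hi hj

set_option maxHeartbeats 1600000 in
theorem step_main (programs L : List String) (off : Int) (move : String)
    (hpre : preMove programs (PySem.List.len programs) move = true)
    (hp : move.toList.head? = some 'p' → programs.Nodup ∧ ∀ s ∈ programs, s.toList.length = 1)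
    (hL : L.Perm programs) :
    stepA (viewN L off) move
        = viewN (danceStep (PySem.List.len programs) (L, off) move).1
                (danceStep (PySem.List.len programs) (L, off) move).2
      ∧ (danceStep (PySem.List.len programs) (L, off) move).1.Perm programs := by
  have hlenL : L.length = programs.length := hL.length_eq
  have hnlen : PySem.List.len programs = (L.length : Int) := by
    rw [PySem.List.len_eq, hlenL]
  rcases hmv : move.toList with - | ⟨c, tl⟩
  · simp [preMove, hmv] at hpre
  simp only [preMove, hmv] at hpre
  have redA : stepA (viewN L off) move = stepAc (viewN L off) move c := by
    simp only [stepA, hmv]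
  have redB : danceStep (PySem.List.len programs) (L, off) move
      = danceStepc (PySem.List.len programs) (L, off) move c := by
    simp only [danceStep, hmv]
  rw [redA, redB]
  unfold stepAc danceStepc
  unfold preMovec at hpre
  by_cases hs : c = 's'
  · rw [if_pos hs] at hpre ⊢
    rw [if_pos hs]
    rcases hd : PySem.Int.ofStr? (PySem.Str.slice move (some 1) none) with - | d
    · rw [hd] at hpre; simp at hpre
    refine ⟨?_, hL⟩
    show spinA (viewN L off) d = viewN L (off - d)
    rw [spinA_eq_viewN, viewN_viewN, show -d + off = off - d by ring]
  rw [if_neg hs] at hpre ⊢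
  rw [if_neg hs]
  by_cases hx : c = 'x'
  · rw [if_pos hx] at hpre ⊢
    rw [if_pos hx]
    revert hpre
    generalize ((PySem.Str.split? (PySem.Str.slice move (some 1) none) "/").getD []).map PySem.Int.ofStr? = ps
    intro hpre
    rcases ps with - | ⟨o1, - | ⟨o2, - | ⟨o3, rest⟩⟩⟩
    · simp at hpre
    · simp at hpre
    case _ =>
      rcases o1 with - | a
      · simp at hpre
      rcases o2 with - | b
      · simp at hpre
      simp only [decide_eq_true_eq] at hpre
      rw [hnlen] at hpre ⊢
      have ha1 : -(L.length:Int) ≤ a := by omega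
      have ha2 : a < (L.length:Int) := by omega
      have hb1 : -(L.length:Int) ≤ b := by omega
      have hb2 : b < (L.length:Int) := by omega
      have hn : 0 < L.length := by omega
      have h0 : (0:Int) < (L.length:Int) := by exact_mod_cast hn
      have h0' : ((L.length:Int)) ≠ 0 := by omega
      constructor
      · exact exchange_view L off a b ha1 ha2 hb1 hb2
      · refine (swapB_perm L _ _ ?_ ?_ ?_ ?_).trans hL <;>
          rw [PySem.Int.mod_eq_emod_of_pos h0]
        · exact Int.emod_nonneg _ h0'
        · exact Int.emod_lt_of_pos _ h0
        · exact Int.emod_nonneg _ h0'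
        · exact Int.emod_lt_of_pos _ h0
    · simp at hpre
  rw [if_neg hx] at hpre ⊢
  rw [if_neg hx]
  by_cases hpc : c = 'p'
  · rw [if_pos hpc] at hpre ⊢
    rw [if_pos hpc]
    obtain ⟨hnd, hsing⟩ := hp (by rw [hmv, hpc]; rfl)
    have hndL : L.Nodup := (hL.nodup_iff).mpr hnd
    have hsingL : ∀ s ∈ L, s.toList.length = 1 := fun s hsm => hsing s (hL.mem_iff.mp hsm)
    revert hpre
    generalize (PySem.Str.split? (PySem.Str.slice move (some 1) none) "/").getD [] = ps
    intro hpre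
    rcases ps with - | ⟨a, - | ⟨b, - | ⟨c3, rest⟩⟩⟩
    · simp at hpre
    · simp at hpre
    case _ =>
      rw [Bool.and_eq_true] at hpre
      have hma : a ∈ programs := by
        have := hpre.1
        simpa using this
      have hmb : b ∈ programs := by
        have := hpre.2
        simpa using this
      have hmaL : a ∈ L := hL.mem_iff.mpr hma
      have hmbL : b ∈ L := hL.mem_iff.mpr hmb
      have hja : (PySem.List.index? L a).isSome := (PySem.List.index?_isSome_iff L a).mpr hmaL
      have hjb : (PySem.List.index? L b).isSome := (PySem.List.index?_isSome_iff L b).mpr hmbL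
      rcases hja' : PySem.List.index? L a with - | ja
      · rw [hja'] at hja; simp at hja
      rcases hjb' : PySem.List.index? L b with - | jb
      · rw [hjb'] at hjb; simp at hjb
      simp only [hja', hjb']
      have hjalt : ja < L.length := by
        have h := hja'
        rw [PySem.List.index?_eq_idxOf?, List.idxOf?_eq_some_iff] at h
        exact h.1
      have hjblt : jb < L.length := by
        have h := hjb'
        rw [PySem.List.index?_eq_idxOf?, List.idxOf?_eq_some_iff] at h
        exact h.1
      constructor
      · exact partner_view L off a b hndL hsingL ja jb hja' hjb'
      · exact (swapB_perm L _ _ (by omega) (by exact_mod_cast hjalt) (by omega)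
          (by exact_mod_cast hjblt)).trans hL
    · simp at hpre
  rw [if_neg hpc] at hpre ⊢
  rw [if_neg hpc]
  exact ⟨rfl, hL⟩

theorem fold_main (programs : List String) (dance : List String) : ∀ (L : List String) (off : Int),
    (∀ m ∈ dance, preMove programs (PySem.List.len programs) m = true) →
    ((∃ m ∈ dance, m.toList.head? = some 'p') → programs.Nodup ∧ ∀ s ∈ programs, s.toList.length = 1) →
    L.Perm programs →
    dance.foldl stepA (viewN L off)
        = viewN (dance.foldl (danceStep (PySem.List.len programs)) (L, off)).1
                (dance.foldl (danceStep (PySem.List.len programs)) (L, off)).2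
      ∧ (dance.foldl (danceStep (PySem.List.len programs)) (L, off)).1.Perm programs := by
  induction dance with
  | nil => intro L off _ _ hL; exact ⟨rfl, hL⟩
  | cons m rest ih =>
    intro L off hpre hp hL
    have hm := hpre m (by simp)
    have hpm : m.toList.head? = some 'p' → programs.Nodup ∧ ∀ s ∈ programs, s.toList.length = 1 := by
      intro h; exact hp ⟨m, by simp, h⟩
    obtain ⟨h1, h2⟩ := step_main programs L off m hm hpm hL
    simp only [List.foldl_cons, h1]
    exact ih (danceStep (PySem.List.len programs) (L, off) m).1
      (danceStep (PySem.List.len programs) (L, off) m).2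
      (fun x hx => hpre x (by simp [hx]))
      (fun ⟨x, hx, hhx⟩ => hp ⟨x, by simp [hx], hhx⟩) h2

-- ===== VERDICT (by name: the statement is the Claim_ definition above) =====
theorem one_round_spec : Claim_equal_one_round := by
  intro programs dance _ hpre
  unfold Spec_one_round one_round
  obtain ⟨h1, h2⟩ := fold_main programs dance programs 0 hpre.1 hpre.2 (List.Perm.refl _)
  have hre : one_round_alt programs dance
      = (PySem.List.pyRange 0 (PySem.List.len programs) 1).map (fun i =>
          PySem.List.pyGetD (dance.foldl (danceStep (PySem.List.len programs)) (programs, 0)).1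
            (PySem.Int.mod (i + (dance.foldl (danceStep (PySem.List.len programs)) (programs, 0)).2)
              (PySem.List.len programs)) "") := rfl
  rw [hre]
  simp only [PySem.List.len_eq] at h1 h2 ⊢
  rw [pyform_eq_viewN _ _ _ (by exact_mod_cast h2.length_eq.symm), ← h1, viewN_zero]
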